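-- pv_equiv track=rewrite | github.com/syspulse/haas-demo | demo/env-aws/store/pipeline/circ1-holders-supply.py | process_transactions
-- ===== SOURCE A (Python) =====
-- zero = 0
--
-- def process_transactions(holders, transfers):
--     if transfers is None:
--         transfers = []
--
--     for transfer in transfers:
--         sender_address = transfer["sender_address"]
--         if sender_address not in holders:
--             holders[sender_address] = zero
--
--         holders[sender_address] = holders[sender_address] - int(transfer["value"]);
--         if holders[sender_address] == zero:
--             del holders[sender_address]
--
--         receiver_address = transfer["receiver_address"]
--         if receiver_address not in holders:
--             holders[receiver_address] = zero
--
--         holders[receiver_address] = holders[receiver_address] + int(transfer["value"]);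
--         if holders[receiver_address] == zero:
--             del holders[receiver_address]
--
--     return holders
-- ===== SOURCE B (Python) =====
-- zero = 0
--
-- def process_transactions(holders, transfers):
--     # Pass 1: aggregate every transfer into one net delta per address.
--     delta = {}
--     for transfer in (transfers if transfers is not None else []):
--         value = int(transfer["value"])
--         sender = transfer["sender_address"]
--         receiver = transfer["receiver_address"]
--         delta[sender] = delta.get(sender, zero) - value
--         delta[receiver] = delta.get(receiver, zero) + value
--     # Pass 2: apply each net delta once to the holders map (mutated in place).
--     for address, d in delta.items():
--         holders[address] = holders.get(address, zero) + d
--         if holders[address] == zero: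
--             del holders[address]
--     return holders
-- ===== Notes on version B (the rewrite author's own statement) =====
-- stated objective: alternative
-- what changed: B replaces A's per-transfer sequential debit/credit updates with two separated passes: it first aggregates all transfers into one net delta per address and then applies each net delta exactly once to the holders map.
import Mathlib
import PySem

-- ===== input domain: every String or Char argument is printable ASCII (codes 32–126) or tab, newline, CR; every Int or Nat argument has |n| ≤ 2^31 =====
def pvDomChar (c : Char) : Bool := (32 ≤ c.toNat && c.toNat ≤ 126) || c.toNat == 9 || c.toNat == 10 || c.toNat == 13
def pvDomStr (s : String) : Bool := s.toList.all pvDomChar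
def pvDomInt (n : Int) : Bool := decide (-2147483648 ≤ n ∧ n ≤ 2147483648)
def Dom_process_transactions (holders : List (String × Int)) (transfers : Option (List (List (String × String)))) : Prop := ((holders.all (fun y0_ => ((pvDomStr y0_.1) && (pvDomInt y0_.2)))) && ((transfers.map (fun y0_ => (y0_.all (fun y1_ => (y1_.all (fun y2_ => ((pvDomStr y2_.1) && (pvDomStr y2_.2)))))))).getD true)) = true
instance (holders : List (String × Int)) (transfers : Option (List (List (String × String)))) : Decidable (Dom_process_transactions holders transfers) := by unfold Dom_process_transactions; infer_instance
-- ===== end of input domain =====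

-- B restructures A as two passes — aggregate all transfers into one net delta per
-- address, then apply each net delta once — instead of A's per-transfer updates; the
-- Python mutates the holders dict in place in both versions, equivalence is about the
-- returned value.

-- ===== PORT A =====
-- one iteration of A's loop; none = the Python raises (KeyError / ValueError)
def pvA_step (h : PySem.Dict String Int) (t : PySem.Dict String String) : Option (PySem.Dict String Int) :=
  match t.get? "sender_address" with
  | none => none
  | some sa =>
    let h1 := if h.contains sa then h else h.insert sa 0
    match (t.get? "value").bind PySem.Int.ofStr? with
    | none => none
    | some v =>
      let h2 := h1.insert sa (h1.getD sa 0 - v)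
      let h3 := if h2.getD sa 0 == 0 then h2.erase sa else h2
      match t.get? "receiver_address" with
      | none => none
      | some ra =>
        let h4 := if h3.contains ra then h3 else h3.insert ra 0
        match (t.get? "value").bind PySem.Int.ofStr? with
        | none => none
        | some v2 =>
          let h5 := h4.insert ra (h4.getD ra 0 + v2)
          some (if h5.getD ra 0 == 0 then h5.erase ra else h5)

def process_transactions (holders : List (String × Int)) (transfers : Option (List (List (String × String)))) : List (String × Int) :=
  (((transfers.getD []).foldl
      (fun (oh : Option (PySem.Dict String Int)) t => oh.bind (fun h => pvA_step h (PySem.Dict.mk t)))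
      (some (PySem.Dict.mk holders))).map PySem.Dict.items).getD holders

-- ===== PORT B =====
-- pass 1 of Source B: aggregate the net delta of every address; none = the Python raises
def pvB_delta (ts : List (List (String × String))) : Option (PySem.Dict String Int) :=
  ts.foldl
    (fun (od : Option (PySem.Dict String Int)) t => od.bind (fun dl =>
      match ((PySem.Dict.mk t).get? "value").bind PySem.Int.ofStr? with
      | none => none
      | some v =>
        match (PySem.Dict.mk t).get? "sender_address", (PySem.Dict.mk t).get? "receiver_address" with
        | some sa, some ra =>
            let d1 := dl.insert sa (dl.getD sa 0 - v)
            some (d1.insert ra (d1.getD ra 0 + v))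
        | _, _ => none))
    (some PySem.Dict.empty)

-- pass 2 of Source B: apply one net delta to the holders map (the loop body, verbatim)
def pvB_apply (h : PySem.Dict String Int) (a : String) (d : Int) : PySem.Dict String Int :=
  let h1 := h.insert a (h.getD a 0 + d)
  if h1.getD a 0 == 0 then h1.erase a else h1

def process_transactions_alt (holders : List (String × Int)) (transfers : Option (List (List (String × String)))) : List (String × Int) :=
  match pvB_delta (transfers.getD []) with
  | none => holders
  | some dl => (dl.items.foldl (fun h p => pvB_apply h p.1 p.2) (PySem.Dict.mk holders)).items

-- ===== PRECONDITION & SPEC =====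
-- helpers Pre_ is phrased with: the flattened stream of signed (address, delta) events
-- of the transfer list, and the running balance of an address after a prefix of it
def pvOk (t : List (String × String)) : Prop :=
  ((PySem.Dict.mk t).get? "sender_address").isSome = true ∧
  ((PySem.Dict.mk t).get? "receiver_address").isSome = true ∧
  (((PySem.Dict.mk t).get? "value").bind PySem.Int.ofStr?).isSome = true

def pvSA (t : List (String × String)) : String := (((PySem.Dict.mk t).get? "sender_address").getD "")
def pvRA (t : List (String × String)) : String := (((PySem.Dict.mk t).get? "receiver_address").getD "")
def pvV (t : List (String × String)) : Int := ((((PySem.Dict.mk t).get? "value").bind PySem.Int.ofStr?).getD 0)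
def pvEv (t : List (String × String)) : List (String × Int) := [(pvSA t, -(pvV t)), (pvRA t, pvV t)]
def pvEvents (ts : List (List (String × String))) : List (String × Int) := ts.flatMap pvEv

def pvNet (es : List (String × Int)) (a : String) : Int := ((es.filter (fun e => e.1 = a)).map Prod.snd).sum
def pvBal (H : List (String × Int)) (es : List (String × Int)) (a : String) : Int :=
  ((H.lookup a).getD 0) + pvNet es a
-- no address's running balance is zero while the address still has a later event
def pvNoMid (H : List (String × Int)) (es : List (String × Int)) : Prop :=
  ∀ i < es.length, ∀ j < es.length, i < j → (es.getD j ("", 0)).1 = (es.getD i ("", 0)).1 →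
    pvBal H (es.take (i + 1)) ((es.getD i ("", 0)).1) ≠ 0

-- Pre_ excludes (a) inputs on which Python A raises: a transfer missing one of the three
-- fields (KeyError) or whose "value" is not an int literal (ValueError); (b) assoc lists
-- with duplicate keys, which do not encode a unique Python dict; and (c) transfer
-- sequences in which some address's running balance transiently hits zero, where A's
-- dict delete-and-reinsert position (vs. B's kept slot) is an accidental order.
def Pre_process_transactions (holders : List (String × Int)) (transfers : Option (List (List (String × String)))) : Prop :=
  (holders.map Prod.fst).Nodup ∧
  (∀ t ∈ transfers.getD [], (t.map Prod.fst).Nodup ∧ pvOk t) ∧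
  pvNoMid holders (pvEvents (transfers.getD []))
instance (holders : List (String × Int)) (transfers : Option (List (List (String × String)))) : Decidable (Pre_process_transactions holders transfers) := by unfold Pre_process_transactions pvNoMid pvOk; infer_instance

def pvWitness_process_transactions : (List (String × Int)) × (Option (List (List (String × String)))) :=
  ([("a", 5)], some [[("sender_address", "a"), ("receiver_address", "b"), ("value", "3")]])

def Spec_process_transactions (holders : List (String × Int)) (transfers : Option (List (List (String × String)))) (out : List (String × Int)) : Prop := out = process_transactions_alt holders transfers
instance (holders : List (String × Int)) (transfers : Option (List (List (String × String)))) (out : List (String × Int)) : Decidable (Spec_process_transactions holders transfers out) := by unfold Spec_process_transactions; infer_instance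

-- ===== CLAIM (what is proved, stated in full; the proofs are below) =====
def Claim_equal_process_transactions : Prop := ∀ (holders : List (String × Int)) (transfers : Option (List (List (String × String)))), Dom_process_transactions holders transfers → Pre_process_transactions holders transfers → Spec_process_transactions holders transfers (process_transactions holders transfers)

-- ===== LEMMAS AND PROOFS =====

-- canonical value of the fold of pvB_apply over an event stream: every key of the
-- initial map, then the new keys in first-occurrence order; a key is kept iff it is
-- untouched or its final balance is nonzero, its value is its final balance
def pvFirsts : List String → List String
  | [] => []
  | a :: l => a :: (pvFirsts l).filter (fun b => b ≠ a)

def pvKeys (H : List (String × Int)) (es : List (String × Int)) : List String :=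
  H.map Prod.fst ++ (pvFirsts (es.map Prod.fst)).filter (fun x => ¬ x ∈ H.map Prod.fst)

def pvF (H : List (String × Int)) (es : List (String × Int)) (k : String) : Option (String × Int) :=
  if k ∈ es.map Prod.fst ∧ pvBal H es k = 0 then none else some (k, pvBal H es k)

def pvCanon (H : List (String × Int)) (es : List (String × Int)) : List (String × Int) :=
  (pvKeys H es).filterMap (pvF H es)

-- ---- pvNet / pvBal facts ----
theorem pvNet_append (p q : List (String × Int)) (k : String) :
    pvNet (p ++ q) k = pvNet p k + pvNet q k := by
  simp [pvNet, List.filter_append]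

theorem pvNet_single (a : String) (d : Int) (k : String) :
    pvNet [(a, d)] k = if a = k then d else 0 := by
  simp [pvNet, List.filter]; split <;> simp_all

theorem pvNet_of_not_mem {p : List (String × Int)} {a : String} (h : a ∉ p.map Prod.fst) :
    pvNet p a = 0 := by
  have : p.filter (fun e => e.1 = a) = [] := by
    apply List.filter_eq_nil_iff.mpr
    intro e he hd
    exact h (List.mem_map.mpr ⟨e, he, by simpa using of_decide_eq_true hd⟩)
  simp [pvNet, this]

theorem pvBal_append_self (H p : List (String × Int)) (a : String) (d : Int) :
    pvBal H (p ++ [(a, d)]) a = pvBal H p a + d := by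
  simp [pvBal, pvNet_append, pvNet_single, add_assoc]

theorem pvBal_append_ne (H p : List (String × Int)) {a k : String} (d : Int) (h : a ≠ k) :
    pvBal H (p ++ [(a, d)]) k = pvBal H p k := by
  simp [pvBal, pvNet_append, pvNet_single, h]

-- ---- pvFirsts facts ----
theorem mem_pvFirsts (l : List String) (a : String) : a ∈ pvFirsts l ↔ a ∈ l := by
  induction l with
  | nil => simp [pvFirsts]
  | cons x l ih =>
    by_cases hax : a = x <;> simp [pvFirsts, List.mem_filter, hax, ih]

theorem nodup_pvFirsts (l : List String) : (pvFirsts l).Nodup := by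
  induction l with
  | nil => simp [pvFirsts]
  | cons x l ih =>
    refine List.Nodup.cons ?_ (ih.filter _)
    intro hx
    simp [List.mem_filter] at hx

theorem pvFirsts_append_singleton (l : List String) (a : String) :
    pvFirsts (l ++ [a]) = if a ∈ l then pvFirsts l else pvFirsts l ++ [a] := by
  induction l with
  | nil => simp [pvFirsts]
  | cons x l ih =>
    show x :: (pvFirsts (l ++ [a])).filter (fun b => b ≠ x)
        = if a ∈ x :: l then x :: (pvFirsts l).filter (fun b => b ≠ x)
          else (x :: (pvFirsts l).filter (fun b => b ≠ x)) ++ [a]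
    by_cases hal : a ∈ l
    · rw [ih, if_pos hal, if_pos (List.mem_cons_of_mem _ hal)]
    · rw [ih, if_neg hal, List.filter_append]
      by_cases hax : a = x
      · subst hax
        simp [List.mem_cons]
      · rw [if_neg (by simp [List.mem_cons, hax, hal])]
        simp [hax]

theorem pvFirsts_of_nodup {l : List String} (h : l.Nodup) : pvFirsts l = l := by
  induction l with
  | nil => rfl
  | cons x l ih =>
    rcases List.nodup_cons.mp h with ⟨hx, hl⟩
    rw [pvFirsts, ih hl, List.filter_eq_self.mpr]
    intro b hb
    simp only [decide_eq_true_eq]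
    rintro rfl; exact hx hb

-- ---- pvKeys facts ----
theorem mem_pvKeys (H es : List (String × Int)) (a : String) :
    a ∈ pvKeys H es ↔ a ∈ H.map Prod.fst ∨ a ∈ es.map Prod.fst := by
  simp [pvKeys, List.mem_filter, mem_pvFirsts]
  tauto

theorem nodup_pvKeys (H es : List (String × Int)) (hnd : (H.map Prod.fst).Nodup) :
    (pvKeys H es).Nodup := by
  refine List.Nodup.append hnd ((nodup_pvFirsts _).filter _) ?_
  intro a ha hb
  have := (List.mem_filter.mp hb).2
  simp only [decide_eq_true_eq] at this
  exact this ha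

theorem pvKeys_append_event (H es : List (String × Int)) (a : String) (d : Int) :
    pvKeys H (es ++ [(a, d)]) =
      if a ∈ pvKeys H es then pvKeys H es else pvKeys H es ++ [a] := by
  have hm : (es ++ [(a, d)]).map Prod.fst = es.map Prod.fst ++ [a] := by simp
  by_cases h1 : a ∈ es.map Prod.fst
  · have he : pvKeys H (es ++ [(a, d)]) = pvKeys H es := by
      unfold pvKeys
      rw [hm, pvFirsts_append_singleton, if_pos h1]
    rw [he, if_pos ((mem_pvKeys H es a).mpr (Or.inr h1))]
  · by_cases h2 : a ∈ H.map Prod.fst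
    · have he : pvKeys H (es ++ [(a, d)]) = pvKeys H es := by
        unfold pvKeys
        rw [hm, pvFirsts_append_singleton, if_neg h1, List.filter_append]
        simp [h2]
      rw [he, if_pos ((mem_pvKeys H es a).mpr (Or.inl h2))]
    · have he : pvKeys H (es ++ [(a, d)]) = pvKeys H es ++ [a] := by
        unfold pvKeys
        rw [hm, pvFirsts_append_singleton, if_neg h1, List.filter_append]
        simp [h2]
      rw [he, if_neg]
      intro hc
      rcases (mem_pvKeys H es a).mp hc with h | h
      exacts [h2 h, h1 h]

-- ---- lookup / decomposition facts ----
theorem lookup_eq_none_of_not_mem {H : List (String × Int)} {a : String}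
    (h : a ∉ H.map Prod.fst) : H.lookup a = none := by
  induction H with
  | nil => rfl
  | cons kv H ih =>
    obtain ⟨k, v⟩ := kv
    simp only [List.map_cons, List.mem_cons, not_or] at h
    rw [List.lookup_cons, beq_false_of_ne h.1]
    exact ih h.2

theorem lookup_of_mem_nodup {H : List (String × Int)} (hnd : (H.map Prod.fst).Nodup)
    {kv : String × Int} (h : kv ∈ H) : H.lookup kv.1 = some kv.2 := by
  induction H with
  | nil => simp at h
  | cons x H ih =>
    rcases List.nodup_cons.mp hnd with ⟨hx, hH⟩
    rcases List.mem_cons.mp h with rfl | hm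
    · simp [List.lookup]
    · have hne : kv.1 ≠ x.1 := by
        intro he
        exact hx (he ▸ List.mem_map.mpr ⟨kv, hm, rfl⟩)
      obtain ⟨k, v⟩ := x
      rw [List.lookup_cons, beq_false_of_ne hne]
      exact ih hH hm

theorem last_occ {p : List (String × Int)} {a : String} (h : a ∈ p.map Prod.fst) :
    ∃ p1 d0 p2, p = p1 ++ (a, d0) :: p2 ∧ a ∉ p2.map Prod.fst := by
  induction p with
  | nil => simp at h
  | cons e p ih =>
    by_cases hm : a ∈ p.map Prod.fst
    · obtain ⟨p1, d0, p2, rfl, hp2⟩ := ih hm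
      exact ⟨e :: p1, d0, p2, rfl, hp2⟩
    · have he : e.1 = a := by
        rcases List.mem_map.mp h with ⟨kv, hkv, rfl⟩
        rcases List.mem_cons.mp hkv with rfl | h'
        · rfl
        · exact absurd (List.mem_map.mpr ⟨kv, h', rfl⟩) hm
      refine ⟨[], e.2, p, ?_, hm⟩
      obtain ⟨x, y⟩ := e
      cases he
      rfl

-- ---- pvNoMid consequences ----
theorem pvNoMid_prefix {H p q : List (String × Int)} (h : pvNoMid H (p ++ q)) :
    pvNoMid H p := by
  intro i hi j hj hij hkey
  have hi' : i < (p ++ q).length := by rw [List.length_append]; omega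
  have hj' : j < (p ++ q).length := by rw [List.length_append]; omega
  have e1 : (p ++ q).getD j ("", 0) = p.getD j ("", 0) := List.getD_append _ _ _ _ hj
  have e2 : (p ++ q).getD i ("", 0) = p.getD i ("", 0) := List.getD_append _ _ _ _ hi
  have e3 : (p ++ q).take (i + 1) = p.take (i + 1) := List.take_append_of_le_length (by omega)
  have := h i hi' j hj' hij (by rw [e1, e2]; exact hkey)
  rwa [e3, e2] at this

theorem pvNoMid_last {H p : List (String × Int)} {a : String} {d : Int}
    (h : pvNoMid H (p ++ [(a, d)])) (hm : a ∈ p.map Prod.fst) : pvBal H p a ≠ 0 := by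
  obtain ⟨p1, d0, p2, rfl, hp2⟩ := last_occ hm
  have hassoc : (p1 ++ (a, d0) :: p2) ++ [(a, d)] = p1 ++ ((a, d0) :: (p2 ++ [(a, d)])) := by
    simp
  have hlen : ((p1 ++ (a, d0) :: p2) ++ [(a, d)]).length = p1.length + 1 + p2.length + 1 := by
    simp; omega
  have hgi : ((p1 ++ (a, d0) :: p2) ++ [(a, d)]).getD p1.length ("", 0) = (a, d0) := by
    rw [List.getD_eq_getElem?_getD, hassoc, List.getElem?_append_right (le_refl _)]
    simp
  have hgj : ((p1 ++ (a, d0) :: p2) ++ [(a, d)]).getD (p1.length + 1 + p2.length) ("", 0) = (a, d) := by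
    rw [List.getD_eq_getElem?_getD, List.getElem?_append_right (by simp; omega)]
    have h0 : p1.length + 1 + p2.length - (p1 ++ (a, d0) :: p2).length = 0 := by simp; omega
    rw [h0]
    simp
  have htake : ((p1 ++ (a, d0) :: p2) ++ [(a, d)]).take (p1.length + 1) = p1 ++ [(a, d0)] := by
    rw [hassoc, List.take_append, List.take_of_length_le (le_of_lt (Nat.lt_succ_self _))]
    simp
  have hb := h p1.length (by rw [hlen]; omega) (p1.length + 1 + p2.length) (by rw [hlen]; omega)
    (by omega) (by rw [hgi, hgj])
  rw [hgi, htake] at hb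
  intro hz
  apply hb
  have h1 : pvNet (p1 ++ [(a, d0)]) a = pvNet p1 a + d0 := by
    rw [pvNet_append, pvNet_single, if_pos rfl]
  have h2 : pvNet (p1 ++ (a, d0) :: p2) a = pvNet p1 a + d0 := by
    rw [show p1 ++ (a, d0) :: p2 = (p1 ++ [(a, d0)]) ++ p2 from by simp, pvNet_append, h1,
      pvNet_of_not_mem hp2, add_zero]
  simp only [pvBal, h1] at *
  rw [h2] at hz
  exact hz

-- ---- filterMap machinery (keys-respecting functions) ----
theorem pvFind (K : List String) (f : String → Option (String × Int)) (a : String)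
    (hf : ∀ k r, f k = some r → r.1 = k) (hnd : K.Nodup) :
    (K.filterMap f).find? (fun pp => pp.1 == a) = if a ∈ K then f a else none := by
  induction K with
  | nil => simp
  | cons k K ih =>
    rcases List.nodup_cons.mp hnd with ⟨hk, hK⟩
    rw [List.filterMap_cons]
    by_cases hak : a = k
    · subst hak
      cases hfk : f a with
      | none => simp [hfk, ih hK, hk]
      | some r =>
        have := hf a r hfk
        simp [List.find?_cons, this, hfk]
    · cases hfk : f k with
      | none => simp [hfk, ih hK, List.mem_cons, hak]
      | some r =>
        have hr := hf k r hfk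
        have : (r.1 == a) = false := by simp [hr, Ne.symm hak]
        simp [List.find?_cons, this, ih hK, List.mem_cons, hak]

theorem pvFilter (K : List String) (f : String → Option (String × Int)) (a : String)
    (hf : ∀ k r, f k = some r → r.1 = k) :
    (K.filterMap f).filter (fun pp => !(pp.1 == a)) =
      K.filterMap (fun k => if k = a then none else f k) := by
  induction K with
  | nil => simp
  | cons k K ih =>
    rw [List.filterMap_cons, List.filterMap_cons]
    cases hfk : f k with
    | none => simp [ih]
    | some r =>
      have hr := hf k r hfk
      by_cases hak : k = a
      · subst hak; simp [hr, ih]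
      · have : (r.1 == a) = false := by simp [hr, hak]
        simp [this, hak, ih, hfk]

theorem pvMap (K : List String) (f : String → Option (String × Int)) (a : String) (w : Int)
    (hf : ∀ k r, f k = some r → r.1 = k) :
    (K.filterMap f).map (fun pp => if pp.1 == a then (a, w) else pp) =
      K.filterMap (fun k => if k = a then (f k).map (fun _ => (a, w)) else f k) := by
  induction K with
  | nil => simp
  | cons k K ih =>
    by_cases hak : k = a
    · subst hak
      cases hfk : f k with
      | none => simp [List.filterMap_cons, hfk]; simpa using ih
      | some r =>
        have hr := hf k r hfk
        simp [List.filterMap_cons, hfk, hr]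
        simpa using ih
    · cases hfk : f k with
      | none => simp [List.filterMap_cons, hfk, hak]; simpa using ih
      | some r =>
        have hr := hf k r hfk
        have hak' : ¬ r.1 = a := by simp [hr, hak]
        simp [List.filterMap_cons, hfk, hak, hak']
        simpa using ih

theorem pvMemKeysFM (K : List String) (f : String → Option (String × Int)) (a : String)
    (hf : ∀ k r, f k = some r → r.1 = k) :
    a ∈ (K.filterMap f).map Prod.fst ↔ a ∈ K ∧ (f a).isSome = true := by
  constructor
  · intro h
    obtain ⟨pp, hpp, rfl⟩ := List.mem_map.mp h
    obtain ⟨k, hkK, hfk⟩ := List.mem_filterMap.mp hpp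
    have := hf k pp hfk
    subst this
    exact ⟨hkK, by rw [hfk]; rfl⟩
  · rintro ⟨hK, hs⟩
    obtain ⟨r, hr⟩ := Option.isSome_iff_exists.mp hs
    have hr1 := hf a r hr
    exact hr1 ▸ List.mem_map.mpr ⟨r, List.mem_filterMap.mpr ⟨a, hK, hr⟩, rfl⟩

theorem pvFilterNodup {l : List String} (hnd : l.Nodup) {k : String} (h : k ∈ l) :
    l.filter (fun x => x = k) = [k] := by
  induction l with
  | nil => simp at h
  | cons x l ih =>
    rcases List.nodup_cons.mp hnd with ⟨hx, hl⟩
    rcases List.mem_cons.mp h with rfl | hm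
    · have : l.filter (fun x => x = k) = [] :=
        List.filter_eq_nil_iff.mpr (fun b hb hd => hx (by simpa using of_decide_eq_true hd ▸ hb))
      simp [List.filter_cons, this]
    · have hxk : ¬ (x = k) := fun he => hx (he ▸ hm)
      simp [List.filter_cons, hxk, ih hl hm]

-- ---- pvB_apply at the items level ----
theorem pvReplFilter (L : List (String × Int)) (a : String) (w : Int) :
    (L.map (fun pp => if pp.1 == a then (a, w) else pp)).filter (fun pp => !(pp.1 == a)) =
      L.filter (fun pp => !(pp.1 == a)) := by
  induction L with
  | nil => rfl
  | cons pp L ih =>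
    by_cases h : pp.1 = a
    · simpa [h] using ih
    · simpa [h] using ih

theorem pvApply_items (L : List (String × Int)) (a : String) (d : Int) :
    (pvB_apply (PySem.Dict.mk L) a d).items =
      (if ((L.find? (fun pp => pp.1 == a)).map Prod.snd).getD 0 + d = 0 then
        L.filter (fun pp => !(pp.1 == a))
      else if L.any (fun pp => pp.1 == a) then
        L.map (fun pp => if pp.1 == a then (a, ((L.find? (fun pp => pp.1 == a)).map Prod.snd).getD 0 + d) else pp)
      else L ++ [(a, ((L.find? (fun pp => pp.1 == a)).map Prod.snd).getD 0 + d)]) := by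
  have hgd : (PySem.Dict.mk L).getD a 0 = ((L.find? (fun pp => pp.1 == a)).map Prod.snd).getD 0 := rfl
  have herase : ∀ (X : PySem.Dict String Int),
      (X.erase a).items = X.items.filter (fun pp => !(pp.1 == a)) := fun _ => rfl
  unfold pvB_apply
  simp only [PySem.Dict.getD_insert_self, hgd]
  set b' : Int := ((L.find? (fun pp => pp.1 == a)).map Prod.snd).getD 0 + d with hb'
  by_cases hz : b' = 0
  · rw [if_pos (by simp [hz]), if_pos hz]
    by_cases hc : (PySem.Dict.mk L).contains a = true
    · rw [herase, PySem.Dict.items_insert_of_contains _ _ hc]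
      exact pvReplFilter L a b'
    · rw [herase, PySem.Dict.items_insert_of_not_contains _ _ (eq_false_of_ne_true hc)]
      show (L ++ [(a, b')]).filter (fun pp => !(pp.1 == a)) = L.filter (fun pp => !(pp.1 == a))
      simp [List.filter_append]
  · rw [if_neg (by simp [hz]), if_neg hz]
    by_cases hc : (PySem.Dict.mk L).contains a = true
    · rw [if_pos (by simpa [PySem.Dict.contains] using hc)]
      exact PySem.Dict.items_insert_of_contains _ _ hc
    · rw [if_neg (by simpa [PySem.Dict.contains] using hc)]
      exact PySem.Dict.items_insert_of_not_contains _ _ (eq_false_of_ne_true hc)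

-- ---- the step and the main characterization ----
theorem pvF_key (H p : List (String × Int)) : ∀ k r, pvF H p k = some r → r.1 = k := by
  intro k r h
  unfold pvF at h
  split at h
  · cases h
  · cases h; rfl

theorem pvF_append_ne (H p : List (String × Int)) (a k : String) (d : Int) (h : k ≠ a) :
    pvF H (p ++ [(a, d)]) k = pvF H p k := by
  unfold pvF
  rw [pvBal_append_ne H p d (Ne.symm h)]
  refine if_congr (and_congr ?_ Iff.rfl) rfl rfl
  simp [h]

theorem pvStep (H p : List (String × Int)) (a : String) (d : Int)
    (hnd : (H.map Prod.fst).Nodup) (hmid : pvNoMid H (p ++ [(a, d)])) :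
    pvB_apply (PySem.Dict.mk (pvCanon H p)) a d = PySem.Dict.mk (pvCanon H (p ++ [(a, d)])) := by
  have hf := pvF_key H p
  have hndK := nodup_pvKeys H p hnd
  have hta : a ∈ (p ++ [(a, d)]).map Prod.fst := by simp
  apply PySem.Dict.ext
  show (pvB_apply (PySem.Dict.mk (pvCanon H p)) a d).items = pvCanon H (p ++ [(a, d)])
  rw [pvApply_items]
  have hfind : (pvCanon H p).find? (fun pp => pp.1 == a)
      = if a ∈ pvKeys H p then pvF H p a else none := pvFind _ _ _ hf hndK
  have hbal : (((pvCanon H p).find? (fun pp => pp.1 == a)).map Prod.snd).getD 0 = pvBal H p a := by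
    rw [hfind]
    by_cases hmem : a ∈ pvKeys H p
    · rw [if_pos hmem]
      unfold pvF
      split
      · rename_i hcond
        simpa using hcond.2.symm
      · simp
    · rw [if_neg hmem]
      have hm := (not_iff_not.mpr (mem_pvKeys H p a)).mp hmem
      push_neg at hm
      simp only [Option.map_none, Option.getD_none]
      rw [pvBal, lookup_eq_none_of_not_mem hm.1, pvNet_of_not_mem hm.2]
      rfl
  rw [hbal, show pvBal H p a + d = pvBal H (p ++ [(a, d)]) a from (pvBal_append_self H p a d).symm]
  by_cases hz : pvBal H (p ++ [(a, d)]) a = 0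
  · rw [if_pos hz]
    show ((pvKeys H p).filterMap (pvF H p)).filter (fun pp => !(pp.1 == a))
        = (pvKeys H (p ++ [(a, d)])).filterMap (pvF H (p ++ [(a, d)]))
    rw [pvFilter _ _ _ hf, pvKeys_append_event]
    by_cases hK : a ∈ pvKeys H p
    · rw [if_pos hK]
      apply List.filterMap_congr
      intro k _
      by_cases hka : k = a
      · subst hka
        rw [if_pos rfl]
        unfold pvF
        rw [if_pos ⟨hta, hz⟩]
      · rw [if_neg hka, (pvF_append_ne H p a k d hka).symm]
    · rw [if_neg hK, List.filterMap_append]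
      have h1 : [a].filterMap (pvF H (p ++ [(a, d)])) = [] := by
        simp only [List.filterMap_cons, List.filterMap_nil]
        unfold pvF
        rw [if_pos ⟨hta, hz⟩]
      rw [h1, List.append_nil]
      apply List.filterMap_congr
      intro k hk
      have hka : k ≠ a := fun he => hK (he ▸ hk)
      rw [if_neg hka, (pvF_append_ne H p a k d hka).symm]
  · rw [if_neg hz]
    have hany : (pvCanon H p).any (fun pp => pp.1 == a) = true
        ↔ a ∈ (pvCanon H p).map Prod.fst := by
      rw [List.any_eq_true]
      simp only [List.mem_map, beq_iff_eq]
    by_cases hpresent : a ∈ (pvCanon H p).map Prod.fst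
    · rw [if_pos (hany.mpr hpresent)]
      obtain ⟨hK, hsome⟩ := (pvMemKeysFM _ _ _ hf).mp hpresent
      show ((pvKeys H p).filterMap (pvF H p)).map
            (fun pp => if pp.1 == a then (a, pvBal H (p ++ [(a, d)]) a) else pp)
          = (pvKeys H (p ++ [(a, d)])).filterMap (pvF H (p ++ [(a, d)]))
      rw [pvMap _ _ _ _ hf, pvKeys_append_event, if_pos hK]
      apply List.filterMap_congr
      intro k _
      by_cases hka : k = a
      · subst hka
        obtain ⟨r, hr⟩ := Option.isSome_iff_exists.mp hsome
        rw [if_pos rfl, hr]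
        unfold pvF
        rw [if_neg (fun hc => hz hc.2)]
        rfl
      · rw [if_neg hka, (pvF_append_ne H p a k d hka).symm]
    · rw [if_neg (fun hc => hpresent (hany.mp hc))]
      have hK : a ∉ pvKeys H p := by
        intro hK
        apply hpresent
        refine (pvMemKeysFM _ _ _ hf).mpr ⟨hK, ?_⟩
        unfold pvF
        rw [if_neg]
        · rfl
        · rintro ⟨htch, hb0⟩
          exact pvNoMid_last hmid htch hb0
      show (pvKeys H p).filterMap (pvF H p) ++ [(a, pvBal H (p ++ [(a, d)]) a)]
          = (pvKeys H (p ++ [(a, d)])).filterMap (pvF H (p ++ [(a, d)]))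
      rw [pvKeys_append_event, if_neg hK, List.filterMap_append]
      have h1 : [a].filterMap (pvF H (p ++ [(a, d)])) = [(a, pvBal H (p ++ [(a, d)]) a)] := by
        simp only [List.filterMap_cons, List.filterMap_nil]
        unfold pvF
        rw [if_neg (fun hc => hz hc.2)]
      rw [h1]
      congr 1
      apply List.filterMap_congr
      intro k hk
      have hka : k ≠ a := fun he => hK (he ▸ hk)
      exact (pvF_append_ne H p a k d hka).symm

theorem pvMain (H : List (String × Int)) (es : List (String × Int))
    (hnd : (H.map Prod.fst).Nodup) (hmid : pvNoMid H es) :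
    es.foldl (fun h e => pvB_apply h e.1 e.2) (PySem.Dict.mk H) = PySem.Dict.mk (pvCanon H es) := by
  induction es using List.reverseRecOn with
  | nil =>
    apply PySem.Dict.ext
    show H = pvCanon H []
    have hself : ∀ kv ∈ H, pvF H [] kv.1 = some kv := by
      intro kv hkv
      unfold pvF
      rw [if_neg (by simp)]
      have hb : pvBal H [] kv.1 = kv.2 := by
        rw [pvBal, lookup_of_mem_nodup hnd hkv]
        simp [pvNet]
      rw [hb]
    show H = (pvKeys H []).filterMap (pvF H [])
    have hk0 : pvKeys H [] = H.map Prod.fst := by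
      unfold pvKeys
      simp [pvFirsts]
    rw [hk0, List.filterMap_map]
    have hcg : H.filterMap (pvF H [] ∘ Prod.fst) = H.filterMap some :=
      List.filterMap_congr (fun kv hkv => hself kv hkv)
    rw [hcg, List.filterMap_some]
  | append_singleton p e ih =>
    obtain ⟨a, d⟩ := e
    rw [List.foldl_append, ih (pvNoMid_prefix hmid)]
    exact pvStep H p a d hnd hmid

-- ---- glue: A's loop is the fold of pvB_apply over the event stream ----
theorem pvBlock (h : PySem.Dict String Int) (a : String) (d : Int) :
    (let h1 := if h.contains a then h else h.insert a 0
     let h2 := h1.insert a (h1.getD a 0 + d)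
     if h2.getD a 0 == 0 then h2.erase a else h2) = pvB_apply h a d := by
  by_cases hc : h.contains a = true
  · simp [pvB_apply, hc]
  · simp only [Bool.not_eq_true] at *
    simp [pvB_apply, hc, PySem.Dict.insert_insert_self, PySem.Dict.getD_insert_self,
      PySem.Dict.getD_of_not_contains h 0 hc]

theorem pvA_step_eq (t : List (String × String)) (h : PySem.Dict String Int) (hok : pvOk t) :
    pvA_step h (PySem.Dict.mk t)
      = some (pvB_apply (pvB_apply h (pvSA t) (-(pvV t))) (pvRA t) (pvV t)) := by
  obtain ⟨h1, h2, h3⟩ := hok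
  obtain ⟨sa, hsa⟩ := Option.isSome_iff_exists.mp h1
  obtain ⟨ra, hra⟩ := Option.isSome_iff_exists.mp h2
  obtain ⟨v, hv⟩ := Option.isSome_iff_exists.mp h3
  have e1 : pvSA t = sa := by simp [pvSA, hsa]
  have e2 : pvRA t = ra := by simp [pvRA, hra]
  have e3 : pvV t = v := by simp [pvV, hv]
  simp only [pvA_step, hsa, hra, hv, e1, e2, e3]
  rw [sub_eq_add_neg]
  rw [pvBlock h sa (-v), pvBlock (pvB_apply h sa (-v)) ra v]

theorem pvA_fold (ts : List (List (String × String))) :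
    ∀ h : PySem.Dict String Int, (∀ t ∈ ts, pvOk t) →
    ts.foldl (fun (oh : Option (PySem.Dict String Int)) t =>
        oh.bind (fun h => pvA_step h (PySem.Dict.mk t))) (some h)
      = some ((pvEvents ts).foldl (fun h e => pvB_apply h e.1 e.2) h) := by
  induction ts with
  | nil => intro h _; simp [pvEvents]
  | cons t rest ih =>
    intro h hok
    have hokt := hok t (List.mem_cons_self ..)
    simp only [List.foldl_cons, Option.bind_some, pvA_step_eq t h hokt,
      pvEvents, List.flatMap_cons, List.foldl_append]
    have : (pvEv t).foldl (fun h e => pvB_apply h e.1 e.2) h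
        = pvB_apply (pvB_apply h (pvSA t) (-(pvV t))) (pvRA t) (pvV t) := by
      simp [pvEv]
    rw [this]
    exact ih _ (fun t' ht' => hok t' (List.mem_cons_of_mem _ ht'))

-- ---- glue: B's first pass builds the net deltas of the event stream ----
theorem pvB_delta_go (ts : List (List (String × String))) :
    ∀ dl : PySem.Dict String Int, (∀ t ∈ ts, pvOk t) →
    ts.foldl
      (fun (od : Option (PySem.Dict String Int)) t => od.bind (fun dl =>
        match ((PySem.Dict.mk t).get? "value").bind PySem.Int.ofStr? with
        | none => none
        | some v =>
          match (PySem.Dict.mk t).get? "sender_address", (PySem.Dict.mk t).get? "receiver_address" with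
          | some sa, some ra =>
              let d1 := dl.insert sa (dl.getD sa 0 - v)
              some (d1.insert ra (d1.getD ra 0 + v))
          | _, _ => none))
      (some dl)
      = some ((pvEvents ts).foldl (fun d e => d.insert e.1 (d.getD e.1 0 + e.2)) dl) := by
  induction ts with
  | nil => intro dl _; simp [pvEvents]
  | cons t rest ih =>
    intro dl hok
    obtain ⟨h1, h2, h3⟩ := hok t (List.mem_cons_self ..)
    obtain ⟨sa, hsa⟩ := Option.isSome_iff_exists.mp h1
    obtain ⟨ra, hra⟩ := Option.isSome_iff_exists.mp h2
    obtain ⟨v, hv⟩ := Option.isSome_iff_exists.mp h3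
    have e1 : pvSA t = sa := by simp [pvSA, hsa]
    have e2 : pvRA t = ra := by simp [pvRA, hra]
    have e3 : pvV t = v := by simp [pvV, hv]
    simp only [List.foldl_cons, Option.bind_some, hsa, hra, hv]
    rw [show pvEvents (t :: rest) = pvEv t ++ pvEvents rest from by simp [pvEvents],
      List.foldl_append]
    have hstep : (pvEv t).foldl (fun d e => d.insert e.1 (d.getD e.1 0 + e.2)) dl
        = (dl.insert sa (dl.getD sa 0 - v)).insert ra
            ((dl.insert sa (dl.getD sa 0 - v)).getD ra 0 + v) := by
      simp [pvEv, e1, e2, e3, sub_eq_add_neg]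
    rw [hstep]
    exact ih _ (fun t' ht' => hok t' (List.mem_cons_of_mem _ ht'))

theorem pvDeltaItems (es : List (String × Int)) :
    (es.foldl (fun d e => d.insert e.1 (d.getD e.1 0 + e.2)) PySem.Dict.empty).items
      = (pvFirsts (es.map Prod.fst)).map (fun k => (k, pvNet es k)) := by
  induction es using List.reverseRecOn with
  | nil => rfl
  | append_singleton p e ih =>
    obtain ⟨a, d⟩ := e
    rw [List.foldl_append, List.foldl_cons, List.foldl_nil]
    set X := p.foldl (fun d e => d.insert e.1 (d.getD e.1 0 + e.2)) PySem.Dict.empty with hX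
    have hgd : X.getD a 0 = pvNet p a := by
      show ((X.items.find? (fun pp => pp.1 == a)).map Prod.snd).getD 0 = pvNet p a
      rw [ih, ← List.filterMap_eq_map,
        pvFind _ _ _ (fun k r h => by cases h; rfl) (nodup_pvFirsts _)]
      by_cases ht : a ∈ pvFirsts (p.map Prod.fst)
      · rw [if_pos ht]; rfl
      · rw [if_neg ht]
        have h' : a ∉ p.map Prod.fst := fun hm => ht ((mem_pvFirsts _ _).mpr hm)
        rw [pvNet_of_not_mem h']
        rfl
    have hfst : (p ++ [(a, d)]).map Prod.fst = p.map Prod.fst ++ [a] := by simp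
    by_cases hc : a ∈ p.map Prod.fst
    · have hcontains : X.contains a = true := by
        show X.items.any (fun pp => pp.1 == a) = true
        rw [ih, List.any_eq_true]
        exact ⟨(a, pvNet p a), List.mem_map.mpr ⟨a, (mem_pvFirsts _ _).mpr hc, rfl⟩, by simp⟩
      rw [PySem.Dict.items_insert_of_contains _ _ hcontains, ih, hgd, hfst,
        pvFirsts_append_singleton, if_pos hc, List.map_map]
      apply List.map_congr_left
      intro k hk
      by_cases hka : k = a
      · subst hka
        simp [pvNet_append, pvNet_single]
      · simp [Function.comp, hka, pvNet_append, pvNet_single, Ne.symm hka]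
    · have hcontains : X.contains a = false := by
        show X.items.any (fun pp => pp.1 == a) = false
        rw [ih, List.any_eq_false]
        intro pp hpp
        obtain ⟨k, hk, rfl⟩ := List.mem_map.mp hpp
        simp only [beq_iff_eq, ne_eq]
        exact fun he => hc (he ▸ (mem_pvFirsts _ _).mp hk)
      rw [PySem.Dict.items_insert_of_not_contains _ _ hcontains, ih, hgd, hfst,
        pvFirsts_append_singleton, if_neg hc, List.map_append]
      congr 1
      · apply List.map_congr_left
        intro k hk
        have hka : k ≠ a := fun he => hc (he ▸ (mem_pvFirsts _ _).mp hk)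
        simp [pvNet_append, pvNet_single, Ne.symm hka]
      · simp [pvNet_append, pvNet_single, pvNet_of_not_mem hc]

theorem pvNet_delta (es : List (String × Int)) (k : String) :
    pvNet ((pvFirsts (es.map Prod.fst)).map (fun k => (k, pvNet es k))) k = pvNet es k := by
  show ((((pvFirsts (es.map Prod.fst)).map (fun k => (k, pvNet es k))).filter
      (fun e => e.1 = k)).map Prod.snd).sum = pvNet es k
  rw [List.filter_map]
  rw [show ((fun (e : String × Int) => decide (e.1 = k)) ∘ (fun k => (k, pvNet es k)))
      = (fun x => decide (x = k)) from rfl]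
  by_cases hk : k ∈ pvFirsts (es.map Prod.fst)
  · rw [pvFilterNodup (nodup_pvFirsts _) hk]
    simp
  · have h' : k ∉ es.map Prod.fst := fun hm => hk ((mem_pvFirsts _ _).mpr hm)
    have hnil : (pvFirsts (es.map Prod.fst)).filter (fun x => decide (x = k)) = [] := by
      apply List.filter_eq_nil_iff.mpr
      intro b hb hd
      exact hk ((of_decide_eq_true hd) ▸ hb)
    rw [hnil, pvNet_of_not_mem h']
    rfl

theorem pvCanon_delta (H es : List (String × Int)) :
    pvCanon H ((pvFirsts (es.map Prod.fst)).map (fun k => (k, pvNet es k))) = pvCanon H es := by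
  have hmapfst : ((pvFirsts (es.map Prod.fst)).map (fun k => (k, pvNet es k))).map Prod.fst
      = pvFirsts (es.map Prod.fst) := by
    rw [List.map_map, show (Prod.fst ∘ fun k => (k, pvNet es k)) = id from rfl, List.map_id]
  show (pvKeys H _).filterMap (pvF H _) = (pvKeys H es).filterMap (pvF H es)
  have hkeys : pvKeys H ((pvFirsts (es.map Prod.fst)).map (fun k => (k, pvNet es k)))
      = pvKeys H es := by
    unfold pvKeys
    rw [hmapfst, pvFirsts_of_nodup (nodup_pvFirsts _)]
  rw [hkeys]
  apply List.filterMap_congr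
  intro k _
  unfold pvF
  have hmem : (k ∈ ((pvFirsts (es.map Prod.fst)).map (fun k => (k, pvNet es k))).map Prod.fst)
      ↔ k ∈ es.map Prod.fst := by rw [hmapfst]; exact mem_pvFirsts _ _
  have hb : pvBal H ((pvFirsts (es.map Prod.fst)).map (fun k => (k, pvNet es k))) k
      = pvBal H es k := by rw [pvBal, pvBal, pvNet_delta]
  rw [hb]
  exact if_congr (and_congr hmem Iff.rfl) rfl rfl

theorem pvNoMid_delta (H es : List (String × Int)) :
    pvNoMid H ((pvFirsts (es.map Prod.fst)).map (fun k => (k, pvNet es k))) := by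
  intro i hi j hj hij hkey
  exfalso
  set es' := (pvFirsts (es.map Prod.fst)).map (fun k => (k, pvNet es k)) with hes'
  have hndk : (es'.map Prod.fst).Nodup := by
    rw [hes', List.map_map,
      show (Prod.fst ∘ fun k => (k, pvNet es k)) = id from rfl, List.map_id]
    exact nodup_pvFirsts _
  have hlen : (es'.map Prod.fst).length = es'.length := by simp
  have hne := List.pairwise_iff_getElem.mp hndk i j (by omega) (by omega) hij
  have hfst : ∀ n (hn : n < es'.length),
      (es'.getD n ("", 0)).1 = (es'.map Prod.fst)[n]'(by omega) := by
    intro n hn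
    rw [List.getD_eq_getElem _ _ hn]
    exact (List.getElem_map _).symm
  exact hne (((hfst i hi).symm.trans hkey.symm).trans (hfst j hj))

-- ===== VERDICT (by name: the statement is the Claim_ definition above) =====
theorem process_transactions_spec : Claim_equal_process_transactions := by
  intro holders transfers _ hpre
  obtain ⟨hnd, hok, hmid⟩ := hpre
  have hok' : ∀ t ∈ transfers.getD [], pvOk t := fun t ht => (hok t ht).2
  unfold Spec_process_transactions process_transactions process_transactions_alt
  rw [pvA_fold (transfers.getD []) (PySem.Dict.mk holders) hok']
  rw [pvMain holders _ hnd hmid]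
  unfold pvB_delta
  rw [pvB_delta_go (transfers.getD []) PySem.Dict.empty hok']
  have hes' := pvDeltaItems (pvEvents (transfers.getD []))
  simp only [hes']
  rw [pvMain holders _ hnd (pvNoMid_delta holders _)]
  simp [pvCanon_delta]
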